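-- pv_equiv track=rewrite | github.com/MuL1ian/LightZero | zoo/masspecgym/envs/massgymenv.py | split_atoms
-- ===== SOURCE A (Python) =====
-- def split_atoms(atom_tokens):
--     """
--     Split a list of SELFIES tokens into different categories.
--
--     Args:
--         atom_tokens (list): List of SELFIES tokens.
--
--     Returns:
--         tuple: Four lists containing pure atoms, bonded atoms, branch tokens, and ring tokens.
--     """
--     pure_atom_tokens = []
--     bonded_atom_tokens = []
--     branch_tokens = []
--     ring_tokens = []
--
--     default_branch = {"[Branch1]", "[Branch2]", "[Branch3]"}
--     default_ring = {"[Ring1]", "[Ring2]", "[Ring3]"}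
--
--     for token in atom_tokens:
--         if token in default_branch:
--             branch_tokens.append(token)
--         elif token in default_ring:
--             ring_tokens.append(token)
--         elif token.startswith("[=") or token.startswith("[#"):
--             if "Branch" in token or "Ring" in token:
--                 continue
--             else:
--                 bonded_atom_tokens.append(token)
--         else:
--             pure_atom_tokens.append(token)
--     return pure_atom_tokens, bonded_atom_tokens, branch_tokens, ring_tokens
-- ===== SOURCE B (Python) =====
-- def split_atoms(atom_tokens):
--     default_branch = {"[Branch1]", "[Branch2]", "[Branch3]"}
--     default_ring = {"[Ring1]", "[Ring2]", "[Ring3]"}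
--
--     def is_bonded(t):
--         return ((t.startswith("[=") or t.startswith("[#"))
--                 and "Branch" not in t and "Ring" not in t)
--
--     pure_atom_tokens = [t for t in atom_tokens
--                         if t not in default_branch and t not in default_ring
--                         and not (t.startswith("[=") or t.startswith("[#"))]
--     bonded_atom_tokens = [t for t in atom_tokens if is_bonded(t)]
--     branch_tokens = [t for t in atom_tokens if t in default_branch]
--     ring_tokens = [t for t in atom_tokens if t in default_ring]
--     return pure_atom_tokens, bonded_atom_tokens, branch_tokens, ring_tokens
-- ===== Notes on version B (the rewrite author's own statement) =====
-- stated objective: idiomatic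
-- what changed: Replaces the single dispatch loop with mutable accumulators by four independent filtering comprehensions, one per output category (tokens bonded but containing Branch/Ring are still dropped from all four).
import Mathlib
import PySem

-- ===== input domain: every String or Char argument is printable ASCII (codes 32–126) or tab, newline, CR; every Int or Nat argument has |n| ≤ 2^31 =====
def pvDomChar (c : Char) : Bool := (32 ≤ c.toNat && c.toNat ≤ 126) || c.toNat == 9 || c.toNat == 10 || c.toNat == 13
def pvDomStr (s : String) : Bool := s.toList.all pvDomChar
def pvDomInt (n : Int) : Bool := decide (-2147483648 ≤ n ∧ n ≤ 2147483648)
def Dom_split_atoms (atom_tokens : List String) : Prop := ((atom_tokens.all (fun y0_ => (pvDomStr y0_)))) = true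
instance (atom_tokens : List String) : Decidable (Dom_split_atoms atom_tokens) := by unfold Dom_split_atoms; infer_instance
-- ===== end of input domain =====

-- B replaces A's single dispatch loop by four independent filter passes (idiomatic; same cost).

-- ===== PORT A =====
def pvBranchSet : PySem.Set String := PySem.Set.ofList ["[Branch1]", "[Branch2]", "[Branch3]"]
def pvRingSet : PySem.Set String := PySem.Set.ofList ["[Ring1]", "[Ring2]", "[Ring3]"]

-- the body of A's for-loop, acting on the 4-tuple of accumulator lists
def pvStepA (st : List String × List String × List String × List String) (token : String) :
    List String × List String × List String × List String :=
  if pvBranchSet.contains token then (st.1, st.2.1, st.2.2.1 ++ [token], st.2.2.2)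
  else if pvRingSet.contains token then (st.1, st.2.1, st.2.2.1, st.2.2.2 ++ [token])
  else if PySem.Str.startswith token "[=" || PySem.Str.startswith token "[#" then
    if PySem.Str.isIn "Branch" token || PySem.Str.isIn "Ring" token then st
    else (st.1, st.2.1 ++ [token], st.2.2.1, st.2.2.2)
  else (st.1 ++ [token], st.2.1, st.2.2.1, st.2.2.2)

def split_atoms (atom_tokens : List String) : List String × List String × List String × List String :=
  atom_tokens.foldl pvStepA ([], [], [], [])

-- ===== PORT B =====
def pvIsPure (t : String) : Bool :=
  !pvBranchSet.contains t && !pvRingSet.contains t &&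
  !(PySem.Str.startswith t "[=" || PySem.Str.startswith t "[#")

def pvIsBonded (t : String) : Bool :=
  (PySem.Str.startswith t "[=" || PySem.Str.startswith t "[#") &&
  !PySem.Str.isIn "Branch" t && !PySem.Str.isIn "Ring" t

def split_atoms_alt (atom_tokens : List String) : List String × List String × List String × List String :=
  (atom_tokens.filter pvIsPure,
   atom_tokens.filter pvIsBonded,
   atom_tokens.filter (fun t => pvBranchSet.contains t),
   atom_tokens.filter (fun t => pvRingSet.contains t))

-- ===== PRECONDITION & SPEC =====
def Spec_split_atoms (atom_tokens : List String) (out : List String × List String × List String × List String) : Prop := out = split_atoms_alt atom_tokens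
instance (atom_tokens : List String) (out : List String × List String × List String × List String) : Decidable (Spec_split_atoms atom_tokens out) := by unfold Spec_split_atoms; infer_instance

-- ===== CLAIM (what is proved, stated in full; the proofs are below) =====
def Claim_equal_split_atoms : Prop := ∀ (atom_tokens : List String), Dom_split_atoms atom_tokens → Spec_split_atoms atom_tokens (split_atoms atom_tokens)

-- ===== LEMMAS AND PROOFS =====

lemma branch_cases {t : String} (h : pvBranchSet.contains t = true) :
    t = "[Branch1]" ∨ t = "[Branch2]" ∨ t = "[Branch3]" := by
  simpa [pvBranchSet, PySem.Set.contains_iff, PySem.Set.mem_ofList] using h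

lemma ring_cases {t : String} (h : pvRingSet.contains t = true) :
    t = "[Ring1]" ∨ t = "[Ring2]" ∨ t = "[Ring3]" := by
  simpa [pvRingSet, PySem.Set.contains_iff, PySem.Set.mem_ofList] using h

lemma branch_not_ring {t : String} (h : pvBranchSet.contains t = true) :
    pvRingSet.contains t = false := by
  rcases branch_cases h with h' | h' | h' <;> subst h' <;> decide

lemma branch_not_bonded {t : String} (h : pvBranchSet.contains t = true) :
    pvIsBonded t = false := by
  rcases branch_cases h with h' | h' | h' <;> subst h' <;> decide

lemma ring_not_bonded {t : String} (h : pvRingSet.contains t = true) :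
    pvIsBonded t = false := by
  rcases ring_cases h with h' | h' | h' <;> subst h' <;> decide

lemma split_loop (ts : List String) (p b br r : List String) :
    ts.foldl pvStepA (p, b, br, r) =
      (p ++ ts.filter pvIsPure, b ++ ts.filter pvIsBonded,
       br ++ ts.filter (fun t => pvBranchSet.contains t),
       r ++ ts.filter (fun t => pvRingSet.contains t)) := by
  induction ts generalizing p b br r with
  | nil => simp
  | cons t ts ih =>
    simp only [List.foldl_cons, List.filter_cons]
    by_cases h1 : t ∈ pvBranchSet
    · have c1 : pvBranchSet.contains t = true := (PySem.Set.contains_iff _ _).mpr h1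
      have c2 : t ∉ pvRingSet := by
        intro hm
        have hc := (PySem.Set.contains_iff _ _).mpr hm
        rw [branch_not_ring c1] at hc
        exact Bool.false_ne_true hc
      simp [pvStepA, h1, c2, ih, branch_not_bonded c1, pvIsPure]
    · by_cases h2 : t ∈ pvRingSet
      · have c2 : pvRingSet.contains t = true := (PySem.Set.contains_iff _ _).mpr h2
        simp [pvStepA, h1, h2, ih, ring_not_bonded c2, pvIsPure]
      · by_cases h3 : (PySem.Str.startswith t "[=" || PySem.Str.startswith t "[#") = true
        · by_cases h4 : (PySem.Str.isIn "Branch" t || PySem.Str.isIn "Ring" t) = true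
          · simp at h3 h4
            have hb : pvIsBonded t = false := by
              rcases h4 with h4 | h4 <;> simp [pvIsBonded, h4]
            have hp : pvIsPure t = false := by
              rcases h3 with h3 | h3 <;> simp [pvIsPure, h3]
            simp [pvStepA, PySem.Set.contains_iff, h1, h2, h3, h4, ih, hb, hp]
          · simp at h3 h4
            have hb : pvIsBonded t = true := by
              rcases h3 with h3 | h3 <;> simp [pvIsBonded, h3, h4.1, h4.2]
            have hp : pvIsPure t = false := by
              rcases h3 with h3 | h3 <;> simp [pvIsPure, h3]
            simp [pvStepA, PySem.Set.contains_iff, h1, h2, h3, h4.1, h4.2, ih, hb, hp]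
        · simp at h3
          have hb : pvIsBonded t = false := by simp [pvIsBonded, h3.1, h3.2]
          have hp : pvIsPure t = true := by simp [pvIsPure, PySem.Set.contains_iff, h1, h2, h3.1, h3.2]
          simp [pvStepA, PySem.Set.contains_iff, h1, h2, h3.1, h3.2, ih, hb, hp]

-- ===== VERDICT (by name: the statement is the Claim_ definition above) =====
theorem split_atoms_spec : Claim_equal_split_atoms := by
  intro atom_tokens _
  unfold Spec_split_atoms split_atoms split_atoms_alt
  simpa using split_loop atom_tokens [] [] [] []
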